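-- pv_equiv track=rewrite | github.com/pypi-data/pypi-mirror-35 | packages/prawframe/prawframe-0.0.1-py3-none-any.whl/prawframe/obfuscation.py | circular_subtract
-- ===== SOURCE A (Python) =====
-- def circular_subtract(start, amount, rng=(30, 126)):
--     output = start - amount
--
--     if output < rng[0]:
--         output += rng[1] + 1
--         output -= rng[0]
--         if output < rng[0]:
--             output = circular_subtract(rng[0], rng[0] - output, rng=rng)
--
--     return output
-- ===== SOURCE B (Python) =====
-- def circular_subtract(start, amount, rng=(30, 126)):
--     lo = rng[0]
--     output = start - amount
--     if output < lo:
--         output = lo + (output - lo) % (rng[1] + 1 - lo)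
--     return output
-- ===== Notes on version B (the rewrite author's own statement) =====
-- stated objective: simpler
-- what changed: Replaces A's repeated-addition recursion over the range period with one closed-form modulo expression (lo + (output-lo) % period), no recursion or loop at all.
-- outside the precondition, e.g. on circular_subtract(30, 902100, (30, 126)): A returns 30, B returns 30
import Mathlib
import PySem

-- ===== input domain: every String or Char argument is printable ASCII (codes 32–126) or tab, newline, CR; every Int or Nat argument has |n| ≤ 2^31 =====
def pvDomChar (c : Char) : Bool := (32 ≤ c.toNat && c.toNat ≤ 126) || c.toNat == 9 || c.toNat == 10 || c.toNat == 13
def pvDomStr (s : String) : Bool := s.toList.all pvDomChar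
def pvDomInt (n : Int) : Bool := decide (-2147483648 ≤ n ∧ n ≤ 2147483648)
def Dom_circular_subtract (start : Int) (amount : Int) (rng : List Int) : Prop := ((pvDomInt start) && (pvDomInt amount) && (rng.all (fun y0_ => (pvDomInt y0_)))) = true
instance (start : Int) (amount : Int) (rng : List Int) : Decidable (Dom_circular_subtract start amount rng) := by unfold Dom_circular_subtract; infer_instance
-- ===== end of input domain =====

-- B replaces A's repeated-addition recursion with a single closed-form modulo expression (simpler).


-- ===== PORT A =====
-- A is recursive; the fuel parameter only totalises the recursion (within Pre_ the
-- recursion depth is ≤ 9000, so fuel 20000 is never exhausted there).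
def circularSubtractFuel (fuel : Nat) (start : Int) (amount : Int) (rng : List Int) : Int :=
  let output := start - amount
  if output < (PySem.List.pyGet? rng 0).getD 0 then
    let output := output + (PySem.List.pyGet? rng 1).getD 0 + 1
    let output := output - (PySem.List.pyGet? rng 0).getD 0
    if output < (PySem.List.pyGet? rng 0).getD 0 then
      match fuel with
      | 0 => output
      | fuel + 1 =>
        circularSubtractFuel fuel ((PySem.List.pyGet? rng 0).getD 0)
          ((PySem.List.pyGet? rng 0).getD 0 - output) rng
    else output
  else output

def circular_subtract (start : Int) (amount : Int) (rng : List Int) : Int :=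
  circularSubtractFuel 20000 start amount rng

-- ===== PORT B =====
def circular_subtract_alt (start : Int) (amount : Int) (rng : List Int) : Int :=
  let lo := (PySem.List.pyGet? rng 0).getD 0
  let output := start - amount
  if output < lo then
    lo + PySem.Int.mod (output - lo) ((PySem.List.pyGet? rng 1).getD 0 + 1 - lo)
  else output

-- ===== PRECONDITION & SPEC =====
-- Pre_ excludes only inputs on which A raises: rng shorter than the indices it reads
-- (IndexError); and, when wrapping is needed, ranges with nonpositive period (the
-- recursion never terminates) and wraps needing more than 9000 recursive calls, on
-- which A overflows the interpreter's recursion limit and raises RecursionError (the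
-- exact overflow point depends on interpreter stack state, so Pre_ stays safely
-- below it; cites show the thin band this margin excludes, where both agree).
def Pre_circular_subtract (start : Int) (amount : Int) (rng : List Int) : Prop :=
  1 ≤ rng.length ∧
  (start - amount < rng.getD 0 0 →
    2 ≤ rng.length ∧ rng.getD 0 0 ≤ rng.getD 1 0 ∧
    rng.getD 0 0 - (start - amount) ≤ 9000 * (rng.getD 1 0 + 1 - rng.getD 0 0))
instance (start : Int) (amount : Int) (rng : List Int) : Decidable (Pre_circular_subtract start amount rng) := by unfold Pre_circular_subtract; infer_instance

def pvWitness_circular_subtract : Int × Int × List Int := (0, 5, [30, 126])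

def Spec_circular_subtract (start : Int) (amount : Int) (rng : List Int) (out : Int) : Prop := out = circular_subtract_alt start amount rng
instance (start : Int) (amount : Int) (rng : List Int) (out : Int) : Decidable (Spec_circular_subtract start amount rng out) := by unfold Spec_circular_subtract; infer_instance

-- ===== CLAIM (what is proved, stated in full; the proofs are below) =====
def Claim_equal_circular_subtract : Prop := ∀ (start : Int) (amount : Int) (rng : List Int), Dom_circular_subtract start amount rng → Pre_circular_subtract start amount rng → Spec_circular_subtract start amount rng (circular_subtract start amount rng)

-- ===== LEMMAS AND PROOFS =====

-- The floor-mod shifted into [0, p) for a value one period below lo.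
theorem mod_of_band (o lo p : Int) (hp : 0 < p) (h1 : lo - p ≤ o) (h2 : o < lo) :
    PySem.Int.mod (o - lo) p = o - lo + p := by
  rw [PySem.Int.mod_eq_emod_of_pos hp,
    show o - lo = (o - lo + p) + p * (-1) by ring, Int.add_mul_emod_self_left,
    Int.emod_eq_of_lt (by omega) (by omega)]
  ring

-- The floor-mod is invariant under adding one period.
theorem mod_period (o lo p : Int) (hp : 0 < p) :
    PySem.Int.mod (o - lo + p) p = PySem.Int.mod (o - lo) p := by
  rw [PySem.Int.mod_eq_emod_of_pos hp, PySem.Int.mod_eq_emod_of_pos hp,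
    show o - lo + p = (o - lo) + p * 1 by ring, Int.add_mul_emod_self_left]

-- A's recursion computes the closed form when the period is positive and the fuel
-- covers the number of wrap steps.
theorem circularSubtractFuel_eq (fuel : Nat) (start amount lo hi : Int) (rng : List Int)
    (h0 : (PySem.List.pyGet? rng 0).getD 0 = lo)
    (h1 : (PySem.List.pyGet? rng 1).getD 0 = hi)
    (hp : 0 < hi + 1 - lo)
    (hb : lo - (start - amount) ≤ (fuel + 1) * (hi + 1 - lo)) :
    circularSubtractFuel fuel start amount rng =
      if start - amount < lo then lo + PySem.Int.mod (start - amount - lo) (hi + 1 - lo)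
      else start - amount := by
  induction fuel generalizing start amount with
  | zero =>
    conv_lhs => unfold circularSubtractFuel
    simp only [h0, h1]
    by_cases h : start - amount < lo
    · have hge : ¬ (start - amount + hi + 1 - lo < lo) := by omega
      simp only [if_pos h, if_neg hge]
      have := mod_of_band (start - amount) lo (hi + 1 - lo) hp (by omega) h
      omega
    · simp [h]
  | succ fuel ih =>
    conv_lhs => unfold circularSubtractFuel
    simp only [h0, h1]
    by_cases h : start - amount < lo
    · simp only [if_pos h]
      by_cases h2 : start - amount + hi + 1 - lo < lo
      · simp only [if_pos h2]
        have hexp : ((fuel : Int) + 1 + 1) * (hi + 1 - lo)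
            = ((fuel : Int) + 1) * (hi + 1 - lo) + (hi + 1 - lo) := by ring
        have hrec := ih lo (lo - (start - amount + hi + 1 - lo))
          (by push_cast at hb ⊢; rw [hexp] at hb; omega)
        rw [hrec]
        have h' : lo - (lo - (start - amount + hi + 1 - lo)) < lo := by omega
        rw [if_pos h']
        rw [show lo - (lo - (start - amount + hi + 1 - lo)) - lo
            = start - amount - lo + (hi + 1 - lo) by ring]
        rw [mod_period (start - amount) lo (hi + 1 - lo) hp]
      · simp only [if_neg h2]
        have := mod_of_band (start - amount) lo (hi + 1 - lo) hp (by omega) h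
        omega
    · simp [h]

theorem pyGet_eq_getD (rng : List Int) (i : Nat) (h : i < rng.length) :
    (PySem.List.pyGet? rng (i : Int)).getD 0 = rng.getD i 0 := by
  simp [PySem.List.pyGet?, PySem.List.pyIdx?, h, List.getD]

theorem circularSubtractFuel_noWrap (fuel : Nat) (start amount : Int) (rng : List Int)
    (h : ¬ start - amount < (PySem.List.pyGet? rng 0).getD 0) :
    circularSubtractFuel fuel start amount rng = start - amount := by
  conv_lhs => unfold circularSubtractFuel
  simp [h]

-- ===== VERDICT (by name: the statement is the Claim_ definition above) =====
theorem circular_subtract_spec : Claim_equal_circular_subtract := by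
  intro start amount rng _ hpre
  obtain ⟨hlen, himp⟩ := hpre
  unfold Spec_circular_subtract circular_subtract circular_subtract_alt
  have h0 : (PySem.List.pyGet? rng 0).getD 0 = rng.getD 0 0 := pyGet_eq_getD rng 0 (by omega)
  by_cases h : start - amount < rng.getD 0 0
  · obtain ⟨hlen2, hle, hbnd⟩ := himp h
    have h1 : (PySem.List.pyGet? rng 1).getD 0 = rng.getD 1 0 := pyGet_eq_getD rng 1 (by omega)
    rw [circularSubtractFuel_eq 20000 start amount (rng.getD 0 0) (rng.getD 1 0) rng h0 h1
      (by omega) (by push_cast; nlinarith)]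
    simp [h0, h1]
  · rw [circularSubtractFuel_noWrap 20000 start amount rng (by rw [h0]; exact h)]
    simp only [List.getD] at h
    simp [h0, List.getD, h]
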